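-- pv_equiv track=rewrite | github.com/YotamGaash/Python-INTRO-projects | EX6/search.py | result_rank_dict
-- ===== SOURCE A (Python) =====
-- from typing import Dict, List
--
-- DOUBLE_DICT_TYPE = Dict[str, Dict[str, int]]
--
-- def get_word_list(words: str, word_dict: DOUBLE_DICT_TYPE) -> List[str]:
--     """
--     transforming a string of words to a list containing only words from the words dict
--     :param word_dict: a dictionary of words
--     :param words: a string of query words
--     :return: a list of words from the string which appears in the word dictionary
--     """
--
--     word_list = []
--     split_words = words.split(" ")
--
--     for word in split_words:
--         if word_dict.__contains__(word):
--             word_list.append(word)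
--     return word_list
--
-- def all_words_in_site(url: str, words: str, word_dict: DOUBLE_DICT_TYPE) -> bool:
--     """
--     this function checks if all the search query words appear in a page
--     :param url: the relative url of a page
--     :param words: the words from the search query
--     :param word_dict: dictionary of words and urls
--     :return:
--     """
--
--     word_list = get_word_list(words, word_dict)
--     for word in word_list:
--         if url not in word_dict[word]:
--             return False
--     return True
--
-- def get_word_val(url: str, words: str, word_dict: DOUBLE_DICT_TYPE) -> int:
--     """
--     this function returns the minimum number of times of the appearances of one of the words in a page
--     :param url: the relative url of a page
--     :param words: the words from the search query
--     :param word_dict: dictionary of words and urls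
--     :return:
--     """
--     word_list = get_word_list(words, word_dict)
--     word_vals = []
--     for word in word_list:
--         word_vals.append(word_dict[word][url])
--     if word_vals:
--         return min(word_vals)
--     else:
--         return 0
--
-- def valid_pages_list(word_dict: DOUBLE_DICT_TYPE, ranking_dict: Dict[str, int],
--                      words: str) -> List[str]:
--     """
--     this function return all the pages that contains all the words from the search query
--     :param ranking_dict: a dictionary of urls and their ranks
--     :param words: the words from the search query
--     :param word_dict: dictionary of words and urls
--     :return: a list of pages that contains all the words
--     """
--     pages_list = []
--
--     for url in ranking_dict:
--         if all_words_in_site(url, words, word_dict):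
--             pages_list.append(url)
--     return pages_list
--
-- def result_rank_dict(words: str, word_dict: DOUBLE_DICT_TYPE,
--                      rank_dict: Dict[str, int], max_results: int) -> List[str]:
--     """
--     this function creates a sorted dictionary of pages and their result-ranks with a maximum of "max_results"
--             keys
--     :param words: the words from the search query
--     :param word_dict: dictionary of words and urls
--     :param rank_dict: a dictionary of urls and their ranks
--     :param max_results: the maximum number of results values to be returned
--     :return: a sorted list of result with a maximum of "max_results" values
--     """
--
--     pages_list = valid_pages_list(word_dict, rank_dict, words)
--     results_val_dict = dict()
--
--     for page in pages_list:
--         word_val = get_word_val(page, words, word_dict)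
--         if word_val > 0:  # adding only pages that contains the words
--             results_val_dict[page] = rank_dict[page] * word_val
--     # using a line of code from stackoverflow which sorts a dictionary by the values of it's keys
--     return (sorted(results_val_dict.items(), key=lambda x: x[1], reverse=True))[:max_results]
-- ===== SOURCE B (Python) =====
-- def _min_count(url, query, word_dict):
--     """Smallest occurrence count of the query words on this page, or None if some word misses it."""
--     mv = None
--     for w in query:
--         c = word_dict[w].get(url)
--         if c is None:
--             return None
--         if mv is None or c < mv:
--             mv = c
--     return mv
--
-- def result_rank_dict(words, word_dict, rank_dict, max_results):
--     query = [w for w in words.split(" ") if w in word_dict]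
--     results = []
--     if query:
--         for url, rank in rank_dict.items():
--             mv = _min_count(url, query, word_dict)
--             if mv is not None and mv > 0:
--                 results.append((url, rank * mv))
--     results.sort(key=lambda p: p[1], reverse=True)
--     return results[:max_results]
-- ===== Notes on version B (the rewrite author's own statement) =====
-- stated objective: faster
-- what changed: A's four passes (re-splitting the query string for every URL, a validity pass, a per-page value pass, an intermediate dict that is then sorted) are replaced by computing the filtered query word list once and a single fused pass over rank_dict.items() with an Option-min accumulator, then one stable sort; Pre_ only excludes association lists with duplicate URL keys in rank_dict, which do not represent any Python dict, so no Python input is excluded.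
import Mathlib
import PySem

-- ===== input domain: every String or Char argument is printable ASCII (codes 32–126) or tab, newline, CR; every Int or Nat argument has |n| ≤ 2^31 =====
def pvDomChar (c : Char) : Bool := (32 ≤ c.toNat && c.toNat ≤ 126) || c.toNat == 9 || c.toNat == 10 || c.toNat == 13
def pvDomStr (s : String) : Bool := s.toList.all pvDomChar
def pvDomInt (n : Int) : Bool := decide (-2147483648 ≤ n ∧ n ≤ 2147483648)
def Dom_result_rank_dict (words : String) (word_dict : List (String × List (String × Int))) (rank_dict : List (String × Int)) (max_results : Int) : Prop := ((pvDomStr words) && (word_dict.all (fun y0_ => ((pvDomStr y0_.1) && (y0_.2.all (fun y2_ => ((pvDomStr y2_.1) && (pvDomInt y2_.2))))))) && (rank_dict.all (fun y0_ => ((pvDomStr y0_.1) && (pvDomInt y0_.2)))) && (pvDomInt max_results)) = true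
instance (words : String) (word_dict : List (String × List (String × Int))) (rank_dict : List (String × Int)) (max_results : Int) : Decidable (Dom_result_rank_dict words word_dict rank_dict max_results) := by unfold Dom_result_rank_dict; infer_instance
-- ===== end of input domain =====

-- B replaces A's four-pass pipeline (re-splitting the query per URL, a validity pass, a value pass,
-- an intermediate dict) by one fused pass over rank_dict with an Option-min accumulator; return-value
-- equivalence only (neither version mutates its arguments).

-- ===== PORT A =====
-- words.split(" "): the separator " " is nonempty, so split? is always some
def pvSplit (words : String) : List String := (PySem.Str.split? words " ").getD []

-- word_dict[w] (a dict viewed as an association list; first-match lookup)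
def pvInner (word_dict : List (String × List (String × Int))) (w : String) : PySem.Dict String Int :=
  PySem.Dict.mk ((PySem.Dict.mk word_dict).getD w [])

def pvGetWordList (words : String) (word_dict : List (String × List (String × Int))) : List String :=
  (pvSplit words).foldl
    (fun acc w => if (PySem.Dict.mk word_dict).contains w then acc ++ [w] else acc) []

-- the early-return loop of all_words_in_site
def pvAllLoop (url : String) (word_dict : List (String × List (String × Int))) : List String → Bool
  | [] => true
  | w :: rest => if (pvInner word_dict w).contains url then pvAllLoop url word_dict rest else false

def pvAllWordsInSite (url : String) (words : String) (word_dict : List (String × List (String × Int))) : Bool :=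
  pvAllLoop url word_dict (pvGetWordList words word_dict)

def pvGetWordVal (url : String) (words : String) (word_dict : List (String × List (String × Int))) : Int :=
  let word_vals := (pvGetWordList words word_dict).foldl
    (fun acc w => acc ++ [(pvInner word_dict w).getD url 0]) []
  match PySem.List.min? word_vals (fun v => v) with
  | some m => m
  | none => 0

def pvValidPagesList (word_dict : List (String × List (String × Int))) (ranking_dict : List (String × Int)) (words : String) : List String :=
  ((PySem.Dict.mk ranking_dict).keys).foldl
    (fun acc url => if pvAllWordsInSite url words word_dict then acc ++ [url] else acc) []

def result_rank_dict (words : String) (word_dict : List (String × List (String × Int))) (rank_dict : List (String × Int)) (max_results : Int) : List (String × Int) :=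
  let pages_list := pvValidPagesList word_dict rank_dict words
  let results_val_dict := pages_list.foldl
    (fun d page =>
      let word_val := pvGetWordVal page words word_dict
      if 0 < word_val then d.insert page ((PySem.Dict.mk rank_dict).getD page 0 * word_val) else d)
    PySem.Dict.empty
  PySem.List.slice (PySem.List.sorted results_val_dict.items (fun x => x.2) true) none (some max_results)

-- ===== PORT B =====
-- _min_count: Option-min accumulator, early None on a missing URL
def pvMinLoop (url : String) (word_dict : List (String × List (String × Int))) : List String → Option Int → Option Int
  | [], mv => mv
  | w :: rest, mv =>
    match (pvInner word_dict w).get? url with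
    | none => none
    | some c => pvMinLoop url word_dict rest
        (some (match mv with | none => c | some m => if c < m then c else m))

def pvMinCount (url : String) (query : List String) (word_dict : List (String × List (String × Int))) : Option Int :=
  pvMinLoop url word_dict query none

def result_rank_dict_alt (words : String) (word_dict : List (String × List (String × Int))) (rank_dict : List (String × Int)) (max_results : Int) : List (String × Int) :=
  let query := (pvSplit words).filter (fun w => (PySem.Dict.mk word_dict).contains w)
  let results : List (String × Int) :=
    if query.isEmpty = true then []
    else rank_dict.foldl
      (fun acc p =>
        match pvMinCount p.1 query word_dict with
        | some mv => if 0 < mv then acc ++ [(p.1, p.2 * mv)] else acc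
        | none => acc) []
  PySem.List.slice (PySem.List.sorted results (fun x => x.2) true) none (some max_results)

-- ===== PRECONDITION & SPEC =====
-- Pre_ excludes association lists whose rank_dict has duplicate URL keys: such a list does not
-- represent any Python dict (the parameter's type), so A never receives it.
def Pre_result_rank_dict (words : String) (word_dict : List (String × List (String × Int))) (rank_dict : List (String × Int)) (max_results : Int) : Prop :=
  (rank_dict.map Prod.fst).Nodup
instance (words : String) (word_dict : List (String × List (String × Int))) (rank_dict : List (String × Int)) (max_results : Int) : Decidable (Pre_result_rank_dict words word_dict rank_dict max_results) := by unfold Pre_result_rank_dict; infer_instance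

def pvWitness_result_rank_dict : String × (List (String × List (String × Int))) × (List (String × Int)) × Int :=
  ("cat dog", [("cat", [("u1", 2), ("u2", 1)]), ("dog", [("u1", 3)])], [("u1", 4), ("u2", 7)], 5)

def Spec_result_rank_dict (words : String) (word_dict : List (String × List (String × Int))) (rank_dict : List (String × Int)) (max_results : Int) (out : List (String × Int)) : Prop := out = result_rank_dict_alt words word_dict rank_dict max_results
instance (words : String) (word_dict : List (String × List (String × Int))) (rank_dict : List (String × Int)) (max_results : Int) (out : List (String × Int)) : Decidable (Spec_result_rank_dict words word_dict rank_dict max_results out) := by unfold Spec_result_rank_dict; infer_instance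

-- ===== CLAIM (what is proved, stated in full; the proofs are below) =====
def Claim_equal_result_rank_dict : Prop := ∀ (words : String) (word_dict : List (String × List (String × Int))) (rank_dict : List (String × Int)) (max_results : Int), Dom_result_rank_dict words word_dict rank_dict max_results → Pre_result_rank_dict words word_dict rank_dict max_results → Spec_result_rank_dict words word_dict rank_dict max_results (result_rank_dict words word_dict rank_dict max_results)

-- ===== LEMMAS AND PROOFS =====

-- A's membership loop is List.all
theorem pvAllLoop_eq_all (url : String) (wd : List (String × List (String × Int))) (Q : List String) :
    pvAllLoop url wd Q = Q.all (fun w => (pvInner wd w).contains url) := by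
  induction Q with
  | nil => rfl
  | cons w rest ih =>
    simp only [pvAllLoop, List.all_cons]
    by_cases h : (pvInner wd w).contains url = true <;> simp [h, ih]

-- B's Option-min loop, started at some m, under "all words contain url"
theorem pvMinLoop_some (url : String) (wd : List (String × List (String × Int))) (Q : List String) :
    ∀ m : Int, pvMinLoop url wd Q (some m) =
      if Q.all (fun w => (pvInner wd w).contains url)
      then some ((Q.map (fun w => (pvInner wd w).getD url 0)).foldl min m)
      else none := by
  induction Q with
  | nil => intro m; rfl
  | cons w rest ih =>
    intro m
    simp only [pvMinLoop, List.all_cons, List.map_cons, List.foldl_cons]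
    cases h : (pvInner wd w).get? url with
    | none => simp [PySem.Dict.contains_eq_isSome_get?, h]
    | some c =>
      have hc : (pvInner wd w).getD url 0 = c := by
        rw [PySem.Dict.getD_eq_get?_getD, h]; rfl
      have hmin : (if c < m then c else m) = min m c := by
        rw [Int.min_def]; split_ifs <;> omega
      rw [PySem.Dict.contains_eq_isSome_get?, h]
      simp only [Option.isSome_some, Bool.true_and, ih, hc, hmin]

-- B's _min_count on a NONEMPTY query: some (A's min value) iff all words contain url
theorem pvMinCount_char (url : String) (wd : List (String × List (String × Int))) (w0 : String) (Qr : List String) :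
    pvMinCount url (w0 :: Qr) wd =
      if (w0 :: Qr).all (fun w => (pvInner wd w).contains url)
      then some ((Qr.map (fun w => (pvInner wd w).getD url 0)).foldl min ((pvInner wd w0).getD url 0))
      else none := by
  simp only [pvMinCount, pvMinLoop, List.all_cons]
  cases h : (pvInner wd w0).get? url with
  | none => simp [PySem.Dict.contains_eq_isSome_get?, h]
  | some c =>
    have hc : (pvInner wd w0).getD url 0 = c := by
      rw [PySem.Dict.getD_eq_get?_getD, h]; rfl
    simp only [PySem.Dict.contains_eq_isSome_get?, h, Option.isSome_some, Bool.true_and,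
      pvMinLoop_some, hc]

-- A's get_word_val on a NONEMPTY word list is that same running minimum
theorem pvGetWordVal_eq (url : String) (words : String) (wd : List (String × List (String × Int)))
    (w0 : String) (Qr : List String) (h : pvGetWordList words wd = w0 :: Qr) :
    pvGetWordVal url words wd =
      (Qr.map (fun w => (pvInner wd w).getD url 0)).foldl min ((pvInner wd w0).getD url 0) := by
  simp only [pvGetWordVal, PySem.List.foldl_append_singleton_eq_map, List.nil_append, h,
    List.map_cons, PySem.List.min?_id_cons]

-- A's word-list loop is a filter of the split query
theorem pvGetWordList_eq (words : String) (wd : List (String × List (String × Int))) :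
    pvGetWordList words wd = (pvSplit words).filter (fun w => (PySem.Dict.mk wd).contains w) := by
  simp only [pvGetWordList, PySem.List.foldl_append_if_eq_filter, List.nil_append]

-- ===== VERDICT (by name: the statement is the Claim_ definition above) =====
theorem result_rank_dict_spec : Claim_equal_result_rank_dict := by
  intro words wd rd max_results _hdom hpre
  have hnd : (rd.map Prod.fst).Nodup := hpre
  unfold Spec_result_rank_dict
  simp only [result_rank_dict, result_rank_dict_alt, ← pvGetWordList_eq]
  cases hQ : pvGetWordList words wd with
  | nil =>
    -- empty query: A inserts nothing (every word_val is 0), B's results are []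
    have hV : ∀ page, pvGetWordVal page words wd = 0 := by
      intro page; simp [pvGetWordVal, hQ, PySem.List.min?]
    have hd : (pvValidPagesList wd rd words).foldl
        (fun d page =>
          let word_val := pvGetWordVal page words wd
          if 0 < word_val then d.insert page ((PySem.Dict.mk rd).getD page 0 * word_val) else d)
        (PySem.Dict.empty : PySem.Dict String Int) = PySem.Dict.empty := by
      rw [PySem.List.foldl_congr_mem _ _ (fun d _ => d) _
        (by intro d page _; simp [hV page]), PySem.List.foldl_ignore]
    rw [hd]
    rfl
  | cons w0 Qr =>
    have hall : ∀ url, pvAllWordsInSite url words wd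
        = (w0 :: Qr).all (fun w => (pvInner wd w).contains url) := by
      intro url; rw [pvAllWordsInSite, hQ, pvAllLoop_eq_all]
    have hV : ∀ url, pvGetWordVal url words wd
        = (Qr.map (fun w => (pvInner wd w).getD url 0)).foldl min ((pvInner wd w0).getD url 0) :=
      fun url => pvGetWordVal_eq url words wd w0 Qr hQ
    -- the common normal form of the pre-sort list
    set c : String × Int → Bool :=
      fun p => ((w0 :: Qr).all fun w => (pvInner wd w).contains p.1) && decide (0 < pvGetWordVal p.1 words wd) with hc
    set f : String × Int → String × Int :=
      fun p => (p.1, p.2 * pvGetWordVal p.1 words wd) with hf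
    -- ===== B side =====
    have hB : rd.foldl
        (fun acc p => match pvMinCount p.1 (w0 :: Qr) wd with
          | some mv => if 0 < mv then acc ++ [(p.1, p.2 * mv)] else acc
          | none => acc) [] = (rd.filter c).map f := by
      rw [PySem.List.foldl_congr_mem _ _ (fun acc p => if c p then acc ++ [f p] else acc) _
        (by
          intro acc p _
          rw [pvMinCount_char, ← hV p.1, hc, hf]
          by_cases hA : ((w0 :: Qr).all fun w => (pvInner wd w).contains p.1) = true
          · simp only [hA, Bool.true_and]
            by_cases hv : 0 < pvGetWordVal p.1 words wd <;> simp [hv]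
          · simp [hA])]
      rw [PySem.List.foldl_append_if, List.nil_append]
    -- ===== A side =====
    have hkeys : (PySem.Dict.mk rd).keys = rd.map Prod.fst := rfl
    have hpages : pvValidPagesList wd rd words
        = (rd.map Prod.fst).filter (fun url => (w0 :: Qr).all fun w => (pvInner wd w).contains url) := by
      simp only [pvValidPagesList, PySem.List.foldl_append_if_eq_filter, List.nil_append, hkeys]
      exact List.filter_congr (fun url _ => hall url)
    have hnd2 : ((pvValidPagesList wd rd words).filter
        (fun page => decide (0 < pvGetWordVal page words wd))).Nodup := by
      rw [hpages]; exact (hnd.filter _).filter _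
    have hA : ((pvValidPagesList wd rd words).foldl
        (fun d page =>
          let word_val := pvGetWordVal page words wd
          if 0 < word_val then d.insert page ((PySem.Dict.mk rd).getD page 0 * word_val) else d)
        (PySem.Dict.empty : PySem.Dict String Int)).items = (rd.filter c).map f := by
      simp only []
      rw [PySem.List.foldl_ite_eq_foldl_filter (fun page => 0 < pvGetWordVal page words wd)
        (fun d page => d.insert page ((PySem.Dict.mk rd).getD page 0 * pvGetWordVal page words wd))
        (pvValidPagesList wd rd words) PySem.Dict.empty]
      rw [PySem.Dict.items_foldl_insert_fresh _ (fun page => page)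
        (fun page => (PySem.Dict.mk rd).getD page 0 * pvGetWordVal page words wd) _
        (by intro a _; rfl) (by simpa using hnd2)]
      have hie : (PySem.Dict.empty : PySem.Dict String Int).items = [] := rfl
      rw [hie, List.nil_append, hpages, List.filter_filter]
      rw [List.filter_map (f := Prod.fst) (p := fun u => decide (0 < pvGetWordVal u words wd) && ((w0 :: Qr).all fun w => (pvInner wd w).contains u))]
      rw [List.map_map]
      have hfc : rd.filter ((fun u => decide (0 < pvGetWordVal u words wd) && ((w0 :: Qr).all fun w => (pvInner wd w).contains u)) ∘ Prod.fst) = rd.filter c := by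
        apply List.filter_congr; intro p _
        simp only [Function.comp, hc, Bool.and_comm]
      rw [hfc]
      apply List.map_congr_left
      intro p hp
      have hmem : (p.1, p.2) ∈ (PySem.Dict.mk rd).items := by
        simpa using List.mem_of_mem_filter hp
      have : (PySem.Dict.mk rd).getD p.1 0 = p.2 :=
        PySem.Dict.getD_of_mem_items _ hmem hnd 0
      simp [Function.comp, hf, this]
    rw [hB, hA]
    simp [List.isEmpty_cons]
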